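-- pv_equiv track=rewrite | github.com/AJPfleger/advent-of-code | 2022/day15/day15.py | generateCovBeac
-- ===== SOURCE A (Python) =====
-- def manhattenDist(pair):
--     return abs(pair[0] - pair[2]) + abs(pair[1] - pair[3])
--
-- def generateCovBeac(meas, targetRow = 2000000):
--     covered = {}
--     beacons = {}
--
--     for m in meas:
--         xS,yS,xB,yB = m
--
--         if yB == targetRow:
--             beacons.update({xB: 'B'})
--
--         d = manhattenDist(m)
--         dRow = abs(targetRow - yS)
--         if dRow > d:
--             continue
--
--         r = d - dRow
--         for x in range(xS-r,xS+r+1):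
--             covered.update({x: '#'})
--
--     return covered, beacons
-- ===== SOURCE B (Python) =====
-- def _mark(covered, cur, hi, merged):
--     # fill covered[x]='#' for every x in [cur,hi] not already inside an interval of merged
--     for a, b in merged:
--         if b < cur or hi < a:
--             continue
--         for x in range(cur, min(a, hi + 1)):
--             covered[x] = '#'
--         cur = max(cur, b + 1)
--     for x in range(cur, hi + 1):
--         covered[x] = '#'
--     return covered
--
-- def _fold(lo, hi, merged):
--     # insert [lo,hi] into the sorted disjoint interval list, merging overlaps/adjacency
--     out = []
--     placed = False
--     for a, b in merged:
--         if b < lo - 1: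
--             out.append((a, b))
--         elif hi + 1 < a:
--             if not placed:
--                 out.append((lo, hi))
--                 placed = True
--             out.append((a, b))
--         else:
--             lo = min(lo, a)
--             hi = max(hi, b)
--     if not placed:
--         out.append((lo, hi))
--     return out
--
-- def generateCovBeac(meas, targetRow = 2000000):
--     covered = {}
--     beacons = {}
--     merged = []   # sorted disjoint intervals of already-covered x's
--     for xS, yS, xB, yB in meas:
--         if yB == targetRow:
--             beacons[xB] = 'B'
--         r = abs(xS - xB) + abs(yS - yB) - abs(targetRow - yS)
--         if r < 0:
--             continue
--         covered = _mark(covered, xS - r, xS + r, merged)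
--         merged = _fold(xS - r, xS + r, merged)
--     return covered, beacons
-- ===== Notes on version B (the rewrite author's own statement) =====
-- stated objective: alternative
-- what changed: B maintains a sorted disjoint interval index over the target row and, per sensor, fills only the gap sub-ranges not yet covered (then merges the sensor's interval into the index), instead of A's re-inserting every x of every sensor's full range into the dict.
import Mathlib
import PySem

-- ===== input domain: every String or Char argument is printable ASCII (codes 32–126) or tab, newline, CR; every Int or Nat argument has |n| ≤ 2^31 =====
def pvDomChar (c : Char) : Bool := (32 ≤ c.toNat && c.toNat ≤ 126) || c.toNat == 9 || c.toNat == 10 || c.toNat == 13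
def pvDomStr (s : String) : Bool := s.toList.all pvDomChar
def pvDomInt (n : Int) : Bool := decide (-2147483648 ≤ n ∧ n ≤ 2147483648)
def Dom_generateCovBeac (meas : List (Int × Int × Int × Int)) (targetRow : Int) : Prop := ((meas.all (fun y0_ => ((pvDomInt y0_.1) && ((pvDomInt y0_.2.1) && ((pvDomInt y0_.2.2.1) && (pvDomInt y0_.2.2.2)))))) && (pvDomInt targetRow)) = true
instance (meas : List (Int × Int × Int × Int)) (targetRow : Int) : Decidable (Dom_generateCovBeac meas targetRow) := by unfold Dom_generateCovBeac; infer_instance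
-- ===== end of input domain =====

-- B builds covered via a sorted disjoint interval index (gap-fill + interval merge) instead of
-- re-inserting every x of every sensor's range; objective: alternative algorithm, identical dicts.


-- ===== PORT A =====
def manhattenDist (pair : Int × Int × Int × Int) : Int :=
  |pair.1 - pair.2.2.1| + |pair.2.1 - pair.2.2.2|

def generateCovBeac (meas : List (Int × Int × Int × Int)) (targetRow : Int) :
    (List (Int × String)) × (List (Int × String)) :=
  let st := meas.foldl
    (fun (st : PySem.Dict Int String × PySem.Dict Int String) m =>
      let beacons := if m.2.2.2 == targetRow then st.2.insert m.2.2.1 "B" else st.2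
      let d := manhattenDist m
      let dRow := |targetRow - m.2.1|
      if dRow > d then (st.1, beacons)
      else
        ((PySem.List.pyRange (m.1 - (d - dRow)) (m.1 + (d - dRow) + 1) 1).foldl
            (fun c x => c.insert x "#") st.1,
          beacons))
    (PySem.Dict.empty, PySem.Dict.empty)
  (st.1.items, st.2.items)

-- ===== PORT B =====
-- _mark: fill covered[x]='#' for every x of [cur,hi] not inside an interval of merged
def markAlt (covered : PySem.Dict Int String) (cur hi : Int) (merged : List (Int × Int)) :
    PySem.Dict Int String :=
  let st := merged.foldl
    (fun (st : PySem.Dict Int String × Int) p =>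
      if p.2 < st.2 || hi < p.1 then st
      else
        ((PySem.List.pyRange st.2 (min p.1 (hi + 1)) 1).foldl (fun c x => c.insert x "#") st.1,
          max st.2 (p.2 + 1)))
    (covered, cur)
  (PySem.List.pyRange st.2 (hi + 1) 1).foldl (fun c x => c.insert x "#") st.1

-- _fold: insert [lo,hi] into the sorted disjoint interval list, merging overlaps/adjacency
def foldAlt (lo hi : Int) (merged : List (Int × Int)) : List (Int × Int) :=
  let st := merged.foldl
    (fun (st : List (Int × Int) × Int × Int × Bool) p =>
      if p.2 < st.2.1 - 1 then (st.1 ++ [p], st.2)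
      else if st.2.2.1 + 1 < p.1 then
        (if st.2.2.2 then st.1 ++ [p] else st.1 ++ [(st.2.1, st.2.2.1), p],
          st.2.1, st.2.2.1, true)
      else (st.1, min st.2.1 p.1, max st.2.2.1 p.2, st.2.2.2))
    ([], lo, hi, false)
  if st.2.2.2 then st.1 else st.1 ++ [(st.2.1, st.2.2.1)]

def generateCovBeac_alt (meas : List (Int × Int × Int × Int)) (targetRow : Int) :
    (List (Int × String)) × (List (Int × String)) :=
  let st := meas.foldl
    (fun (st : PySem.Dict Int String × PySem.Dict Int String × List (Int × Int)) m =>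
      let beacons := if m.2.2.2 == targetRow then st.2.1.insert m.2.2.1 "B" else st.2.1
      let r := |m.1 - m.2.2.1| + |m.2.1 - m.2.2.2| - |targetRow - m.2.1|
      if r < 0 then (st.1, beacons, st.2.2)
      else
        (markAlt st.1 (m.1 - r) (m.1 + r) st.2.2, beacons,
          foldAlt (m.1 - r) (m.1 + r) st.2.2))
    (PySem.Dict.empty, PySem.Dict.empty, [])
  (st.1.items, st.2.1.items)

-- ===== PRECONDITION & SPEC =====
def Spec_generateCovBeac (meas : List (Int × Int × Int × Int)) (targetRow : Int) (out : (List (Int × String)) × (List (Int × String))) : Prop := out = generateCovBeac_alt meas targetRow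
instance (meas : List (Int × Int × Int × Int)) (targetRow : Int) (out : (List (Int × String)) × (List (Int × String))) : Decidable (Spec_generateCovBeac meas targetRow out) := by unfold Spec_generateCovBeac; infer_instance

-- ===== CLAIM (what is proved, stated in full; the proofs are below) =====
def Claim_equal_generateCovBeac : Prop := ∀ (meas : List (Int × Int × Int × Int)) (targetRow : Int), Dom_generateCovBeac meas targetRow → Spec_generateCovBeac meas targetRow (generateCovBeac meas targetRow)

-- ===== LEMMAS AND PROOFS =====

-- x lies in some interval of ms
def hitIv (x : Int) (ms : List (Int × Int)) : Bool :=
  ms.any (fun p => decide (p.1 ≤ x ∧ x ≤ p.2))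

-- sorted, disjoint (gaps ≥ 2), nonempty intervals
def SG (ms : List (Int × Int)) : Prop :=
  List.Pairwise (fun p q : Int × Int => p.2 + 1 < q.1) ms ∧ ∀ p ∈ ms, p.1 ≤ p.2

-- clean recursive counterpart of foldAlt (proof device)
def recFold (lo hi : Int) : List (Int × Int) → List (Int × Int)
  | [] => [(lo, hi)]
  | (a, b) :: rest =>
    if b < lo - 1 then (a, b) :: recFold lo hi rest
    else if hi + 1 < a then (lo, hi) :: (a, b) :: rest
    else recFold (min lo a) (max hi b) rest

lemma hitIv_cons (x : Int) (p : Int × Int) (ms : List (Int × Int)) :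
    hitIv x (p :: ms) = (decide (p.1 ≤ x ∧ x ≤ p.2) || hitIv x ms) := by
  simp [hitIv]

lemma insert_self_eq (d : PySem.Dict Int String) (k : Int) (v : String)
    (hnd : d.keys.Nodup) (h : d.get? k = some v) : d.insert k v = d := by
  apply PySem.Dict.ext
  rw [PySem.Dict.items_insert_of_contains d v (by rw [PySem.Dict.contains_eq_isSome_get?, h]; rfl)]
  conv_rhs => rw [← List.map_id d.items]
  apply List.map_congr_left
  intro p hp
  by_cases hk : p.1 == k
  · simp only [hk, if_pos]
    obtain ⟨pk, pv⟩ := p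
    have hb : pk = k := eq_of_beq hk
    subst hb
    have := PySem.Dict.get?_of_mem_items d hp hnd
    rw [h] at this
    simp_all
  · simp [hk]

lemma get?_foldl_ins (xs : List Int) (c : PySem.Dict Int String) (y : Int) :
    (xs.foldl (fun c x => c.insert x "#") c).get? y
      = if y ∈ xs then some "#" else c.get? y := by
  induction xs generalizing c with
  | nil => simp
  | cons x xs ih =>
    simp only [List.foldl_cons, ih, List.mem_cons]
    by_cases hy : y ∈ xs
    · simp [hy]
    · by_cases hx : y = x
      · simp [hx, PySem.Dict.get?_insert_self]
      · simp [hx, hy, PySem.Dict.get?_insert_of_ne _ _ hx]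

lemma nodup_foldl_ins (xs : List Int) (c : PySem.Dict Int String) (h : c.keys.Nodup) :
    (xs.foldl (fun c x => c.insert x "#") c).keys.Nodup :=
  PySem.Dict.nodup_keys_foldl_insert xs (fun _ _ => "#") c h

lemma foldl_ins_filter (xs : List Int) (c : PySem.Dict Int String) (p : Int → Bool)
    (hnd : c.keys.Nodup)
    (h : ∀ x ∈ xs, p x = false → c.get? x = some "#") :
    (xs.filter p).foldl (fun c x => c.insert x "#") c
      = xs.foldl (fun c x => c.insert x "#") c := by
  induction xs generalizing c with
  | nil => simp
  | cons x xs ih =>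
    by_cases hp : p x
    · simp only [List.filter_cons, hp, if_pos, List.foldl_cons]
      apply ih
      · exact PySem.Dict.nodup_keys_insert _ _ _ hnd
      · intro z hz hpz
        by_cases hzx : z = x
        · subst hzx; simp [PySem.Dict.get?_insert_self]
        · rw [PySem.Dict.get?_insert_of_ne _ _ hzx]
          exact h z (List.mem_cons_of_mem _ hz) hpz
    · simp only [List.filter_cons, hp, List.foldl_cons]
      rw [insert_self_eq c x "#" hnd (h x (List.mem_cons_self) (by simpa using hp))]
      exact ih c hnd (fun z hz => h z (List.mem_cons_of_mem _ hz))

lemma markAlt_eq_filter (ms : List (Int × Int)) (c : PySem.Dict Int String) (cur hi : Int)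
    (hS : SG ms) :
    markAlt c cur hi ms
      = ((PySem.List.pyRange cur (hi + 1) 1).filter (fun x => !hitIv x ms)).foldl
          (fun c x => c.insert x "#") c := by
  induction ms generalizing c cur with
  | nil =>
    simp only [markAlt, List.foldl_nil]
    congr 1
    rw [List.filter_eq_self.2]
    intro x _; simp [hitIv]
  | cons p rest ih =>
    obtain ⟨a, b⟩ := p
    obtain ⟨hpw, hb⟩ := hS
    have hab : a ≤ b := hb (a, b) (by simp)
    have hrest : SG rest := ⟨hpw.of_cons, fun q hq => hb q (List.mem_cons_of_mem _ hq)⟩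
    have hsep : ∀ q ∈ rest, b + 1 < q.1 := fun q hq => (List.pairwise_cons.1 hpw).1 q hq
    simp only [markAlt, List.foldl_cons]
    by_cases hskip : b < cur ∨ hi < a
    · have hskip' : (decide (b < cur) || decide (hi < a)) = true := by
        rcases hskip with h | h <;> simp [h]
      simp only [hskip', if_pos]
      have := ih c cur hrest
      simp only [markAlt] at this
      rw [this]
      congr 1
      apply List.filter_congr
      intro x hx
      have hxm := (PySem.List.mem_pyRange_one).1 hx
      simp only [hitIv, List.any_cons]
      have : ¬(a ≤ x ∧ x ≤ b) := by omega
      simp [this]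
    · have hcb : cur ≤ b := by omega
      have hahi : a ≤ hi := by omega
      rw [show (decide (b < cur) || decide (hi < a)) = false from by simp; omega]
      simp only [Bool.false_eq_true, if_false]
      have := ih ((PySem.List.pyRange cur (min a (hi + 1)) 1).foldl (fun c x => c.insert x "#") c)
        (max cur (b + 1)) hrest
      simp only [markAlt] at this
      rw [this, ← List.foldl_append]
      congr 1
      -- list identity:
      by_cases hch : cur ≤ hi
      · have e1 : PySem.List.pyRange cur (hi + 1) 1
            = PySem.List.pyRange cur (max cur a) 1 ++ PySem.List.pyRange (max cur a) (hi + 1) 1 :=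
          PySem.List.pyRange_one_append _ _ _ (by omega) (by omega)
        have e2 : PySem.List.pyRange (max cur a) (hi + 1) 1
            = PySem.List.pyRange (max cur a) (min (max cur (b + 1)) (hi + 1)) 1
              ++ PySem.List.pyRange (min (max cur (b + 1)) (hi + 1)) (hi + 1) 1 :=
          PySem.List.pyRange_one_append _ _ _ (by omega) (by omega)
        rw [e1, e2, List.filter_append, List.filter_append]
        have s1 : (PySem.List.pyRange cur (max cur a) 1).filter (fun x => !hitIv x ((a, b) :: rest))
            = PySem.List.pyRange cur (min a (hi + 1)) 1 := by
          rw [List.filter_eq_self.2, show min a (hi + 1) = a by omega]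
          · by_cases hca : cur ≤ a
            · congr 1; omega
            · rw [PySem.List.pyRange_one_eq_nil (by omega), PySem.List.pyRange_one_eq_nil (by omega)]
          · intro x hx
            have hxm := (PySem.List.mem_pyRange_one).1 hx
            simp only [hitIv, List.any_cons, Bool.not_eq_eq_eq_not, Bool.not_true,
              Bool.or_eq_false_iff, List.any_eq_false]
            constructor
            · simp; omega
            · intro q hq
              have := hsep q hq
              simp; omega
        have s2 : (PySem.List.pyRange (max cur a) (min (max cur (b + 1)) (hi + 1)) 1).filter
              (fun x => !hitIv x ((a, b) :: rest)) = [] := by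
          rw [List.filter_eq_nil_iff]
          intro x hx
          have hxm := (PySem.List.mem_pyRange_one).1 hx
          have hax : a ≤ x ∧ x ≤ b := by omega
          simp [hitIv, hax]
        have s3 : (PySem.List.pyRange (min (max cur (b + 1)) (hi + 1)) (hi + 1) 1).filter
              (fun x => !hitIv x ((a, b) :: rest))
            = (PySem.List.pyRange (max cur (b + 1)) (hi + 1) 1).filter (fun x => !hitIv x rest) := by
          have e3 : PySem.List.pyRange (min (max cur (b + 1)) (hi + 1)) (hi + 1) 1
              = PySem.List.pyRange (max cur (b + 1)) (hi + 1) 1 := by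
            by_cases hc : max cur (b + 1) ≤ hi + 1
            · congr 1; omega
            · rw [PySem.List.pyRange_one_eq_nil (by omega), PySem.List.pyRange_one_eq_nil (by omega)]
          rw [e3]
          apply List.filter_congr
          intro x hx
          have hxm := (PySem.List.mem_pyRange_one).1 hx
          simp only [hitIv, List.any_cons]
          have : ¬(a ≤ x ∧ x ≤ b) := by omega
          simp [this]
        rw [s1, s2, s3]
        simp
      · -- cur > hi : everything empty
        rw [PySem.List.pyRange_one_eq_nil (show hi + 1 ≤ cur by omega),
          PySem.List.pyRange_one_eq_nil (show min a (hi + 1) ≤ cur by omega),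
          PySem.List.pyRange_one_eq_nil (show hi + 1 ≤ max cur (b + 1) by omega)]
        simp

lemma foldAlt_aux_placed (ms : List (Int × Int)) :
    ∀ (out : List (Int × Int)) (lo hi : Int), lo ≤ hi →
      (∀ p ∈ ms, hi + 1 < p.1 ∧ p.1 ≤ p.2) →
      ms.foldl
        (fun (st : List (Int × Int) × Int × Int × Bool) p =>
          if p.2 < st.2.1 - 1 then (st.1 ++ [p], st.2)
          else if st.2.2.1 + 1 < p.1 then
            (if st.2.2.2 then st.1 ++ [p] else st.1 ++ [(st.2.1, st.2.2.1), p],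
              st.2.1, st.2.2.1, true)
          else (st.1, min st.2.1 p.1, max st.2.2.1 p.2, st.2.2.2))
        (out, lo, hi, true) = (out ++ ms, lo, hi, true) := by
  induction ms with
  | nil => intro out lo hi _ _; simp
  | cons p rest ih =>
    intro out lo hi hlh hall
    obtain ⟨h1, h2⟩ := hall p (by simp)
    simp only [List.foldl_cons]
    rw [if_neg (show ¬(p.2 < lo - 1) from by omega), if_pos (show hi + 1 < p.1 from h1)]
    simp only [reduceIte]
    rw [ih (out ++ [p]) lo hi hlh (fun q hq => hall q (List.mem_cons_of_mem _ hq))]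
    simp

lemma foldAlt_aux (ms : List (Int × Int)) :
    ∀ (out : List (Int × Int)) (lo hi : Int), SG ms → lo ≤ hi →
      (let r := ms.foldl
        (fun (st : List (Int × Int) × Int × Int × Bool) p =>
          if p.2 < st.2.1 - 1 then (st.1 ++ [p], st.2)
          else if st.2.2.1 + 1 < p.1 then
            (if st.2.2.2 then st.1 ++ [p] else st.1 ++ [(st.2.1, st.2.2.1), p],
              st.2.1, st.2.2.1, true)
          else (st.1, min st.2.1 p.1, max st.2.2.1 p.2, st.2.2.2))
        (out, lo, hi, false);
      if r.2.2.2 then r.1 else r.1 ++ [(r.2.1, r.2.2.1)]) = out ++ recFold lo hi ms := by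
  induction ms with
  | nil => intro out lo hi _ _; simp [recFold]
  | cons p rest ih =>
    intro out lo hi hS hlh
    obtain ⟨a, b⟩ := p
    have hab : a ≤ b := hS.2 (a, b) (by simp)
    have hsep : ∀ q ∈ rest, b + 1 < q.1 := fun q hq => (List.pairwise_cons.1 hS.1).1 q hq
    have hrest : SG rest := ⟨hS.1.of_cons, fun q hq => hS.2 q (List.mem_cons_of_mem _ hq)⟩
    simp only [List.foldl_cons]
    by_cases hb1 : b < lo - 1
    · rw [if_pos (show (b : Int) < lo - 1 from hb1)]
      have := ih (out ++ [(a, b)]) lo hi hrest hlh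
      dsimp only at this ⊢
      rw [this, recFold]
      rw [if_pos hb1]
      simp
    · rw [if_neg (show ¬((b : Int) < lo - 1) from hb1)]
      by_cases ha1 : hi + 1 < a
      · rw [if_pos (show (hi : Int) + 1 < a from ha1)]
        simp only [Bool.false_eq_true, reduceIte]
        rw [foldAlt_aux_placed rest (out ++ [(lo, hi), (a, b)]) lo hi hlh
          (fun q hq => ⟨by have := hsep q hq; omega, hrest.2 q hq⟩)]
        simp only [recFold, if_neg hb1, if_pos ha1, reduceIte]
        simp
      · rw [if_neg (show ¬((hi : Int) + 1 < a) from ha1)]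
        have := ih out (min lo a) (max hi b) hrest (by omega)
        dsimp only at this ⊢
        rw [this, recFold, if_neg hb1, if_neg ha1]

lemma foldAlt_eq_recFold (lo hi : Int) (ms : List (Int × Int)) (hS : SG ms) (hlh : lo ≤ hi) :
    foldAlt lo hi ms = recFold lo hi ms := by
  have := foldAlt_aux ms [] lo hi hS hlh
  dsimp only at this
  simpa [foldAlt] using this

lemma recFold_start_lb (ms : List (Int × Int)) :
    ∀ (lo hi c : Int), c < lo → (∀ p ∈ ms, c < p.1) →
      ∀ q ∈ recFold lo hi ms, c < q.1 := by
  induction ms with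
  | nil => intro lo hi c h1 _ q hq; simp [recFold] at hq; subst hq; exact h1
  | cons p rest ih =>
    intro lo hi c h1 h2 q hq
    obtain ⟨a, b⟩ := p
    rw [recFold] at hq
    split_ifs at hq with hb1 ha1
    · rcases List.mem_cons.1 hq with h | h
      · subst h; exact h2 (a, b) (by simp)
      · exact ih lo hi c h1 (fun r hr => h2 r (List.mem_cons_of_mem _ hr)) q h
    · rcases List.mem_cons.1 hq with h | h
      · subst h; exact h1
      · exact h2 q h
    · exact ih (min lo a) (max hi b) c
        (by have := h2 (a, b) (by simp); dsimp only at this; omega)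
        (fun r hr => h2 r (List.mem_cons_of_mem _ hr)) q hq

lemma SG_recFold (ms : List (Int × Int)) :
    ∀ (lo hi : Int), SG ms → lo ≤ hi → SG (recFold lo hi ms) := by
  induction ms with
  | nil => intro lo hi _ hlh; exact ⟨by simp [recFold], by simp [recFold]; omega⟩
  | cons p rest ih =>
    intro lo hi hS hlh
    obtain ⟨a, b⟩ := p
    have hab : a ≤ b := hS.2 (a, b) (by simp)
    have hsep : ∀ q ∈ rest, b + 1 < q.1 := fun q hq => (List.pairwise_cons.1 hS.1).1 q hq
    have hrest : SG rest := ⟨hS.1.of_cons, fun q hq => hS.2 q (List.mem_cons_of_mem _ hq)⟩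
    rw [recFold]
    split_ifs with hb1 ha1
    · have hIH := ih lo hi hrest hlh
      refine ⟨List.pairwise_cons.2 ⟨?_, hIH.1⟩, ?_⟩
      · exact recFold_start_lb rest lo hi (b + 1) (by omega) (fun q hq => hsep q hq)
      · intro q hq
        rcases List.mem_cons.1 hq with h | h
        · subst h; exact hab
        · exact hIH.2 q h
    · refine ⟨List.pairwise_cons.2 ⟨?_, hS.1⟩, ?_⟩
      · intro q hq
        rcases List.mem_cons.1 hq with h | h
        · subst h; dsimp only; omega
        · have := hsep q h; omega
      · intro q hq
        rcases List.mem_cons.1 hq with h | h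
        · subst h; exact hlh
        · exact hS.2 q h
    · exact ih (min lo a) (max hi b) hrest (by omega)

lemma hitIv_recFold (ms : List (Int × Int)) :
    ∀ (lo hi : Int), (∀ p ∈ ms, p.1 ≤ p.2) → lo ≤ hi → ∀ x,
      hitIv x (recFold lo hi ms) = (decide (lo ≤ x ∧ x ≤ hi) || hitIv x ms) := by
  induction ms with
  | nil => intro lo hi _ _ x; simp [recFold, hitIv]
  | cons p rest ih =>
    intro lo hi hb hlh x
    obtain ⟨a, b⟩ := p
    have hab : a ≤ b := hb (a, b) (by simp)
    have hbr : ∀ q ∈ rest, q.1 ≤ q.2 := fun q hq => hb q (List.mem_cons_of_mem _ hq)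
    rw [recFold]
    split_ifs with hb1 ha1
    · rw [hitIv_cons, ih lo hi hbr hlh x, hitIv_cons]
      exact Bool.or_left_comm _ _ _
    · simp [hitIv_cons]
    · rw [ih (min lo a) (max hi b) hbr (by omega) x, hitIv_cons]
      have he : (min lo a ≤ x ∧ x ≤ max hi b) ↔ ((lo ≤ x ∧ x ≤ hi) ∨ (a ≤ x ∧ x ≤ b)) := by
        omega
      rw [show decide (min lo a ≤ x ∧ x ≤ max hi b)
          = (decide (lo ≤ x ∧ x ≤ hi) || decide (a ≤ x ∧ x ≤ b)) from by
        by_cases h1 : lo ≤ x ∧ x ≤ hi <;> by_cases h2 : a ≤ x ∧ x ≤ b <;>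
          simp [h1, h2] <;> omega]
      rw [Bool.or_assoc]

lemma loop_eq (targetRow : Int) (meas : List (Int × Int × Int × Int)) :
    ∀ (c bd : PySem.Dict Int String) (ms : List (Int × Int)),
      c.keys.Nodup →
      (∀ x, c.get? x = if hitIv x ms then some "#" else none) →
      SG ms →
      meas.foldl
        (fun (st : PySem.Dict Int String × PySem.Dict Int String) m =>
          let beacons := if m.2.2.2 == targetRow then st.2.insert m.2.2.1 "B" else st.2
          let d := manhattenDist m
          let dRow := |targetRow - m.2.1|
          if dRow > d then (st.1, beacons)
          else
            ((PySem.List.pyRange (m.1 - (d - dRow)) (m.1 + (d - dRow) + 1) 1).foldl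
                (fun c x => c.insert x "#") st.1,
              beacons)) (c, bd)
        = ((meas.foldl
            (fun (st : PySem.Dict Int String × PySem.Dict Int String × List (Int × Int)) m =>
              let beacons := if m.2.2.2 == targetRow then st.2.1.insert m.2.2.1 "B" else st.2.1
              let r := |m.1 - m.2.2.1| + |m.2.1 - m.2.2.2| - |targetRow - m.2.1|
              if r < 0 then (st.1, beacons, st.2.2)
              else
                (markAlt st.1 (m.1 - r) (m.1 + r) st.2.2, beacons,
                  foldAlt (m.1 - r) (m.1 + r) st.2.2)) (c, bd, ms)).1,
           (meas.foldl
            (fun (st : PySem.Dict Int String × PySem.Dict Int String × List (Int × Int)) m =>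
              let beacons := if m.2.2.2 == targetRow then st.2.1.insert m.2.2.1 "B" else st.2.1
              let r := |m.1 - m.2.2.1| + |m.2.1 - m.2.2.2| - |targetRow - m.2.1|
              if r < 0 then (st.1, beacons, st.2.2)
              else
                (markAlt st.1 (m.1 - r) (m.1 + r) st.2.2, beacons,
                  foldAlt (m.1 - r) (m.1 + r) st.2.2)) (c, bd, ms)).2.1) := by
  induction meas with
  | nil => intro c bd ms _ _ _; simp
  | cons m t ih =>
    intro c bd ms hnd hiff hS
    simp only [List.foldl_cons, manhattenDist]
    set r := |m.1 - m.2.2.1| + |m.2.1 - m.2.2.2| - |targetRow - m.2.1| with hrdef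
    by_cases hr : r < 0
    · rw [if_pos (show |targetRow - m.2.1| > |m.1 - m.2.2.1| + |m.2.1 - m.2.2.2| from by
          rw [hrdef] at hr; linarith), if_pos hr]
      exact ih c _ ms hnd hiff hS
    · have hr0 : (0 : Int) ≤ r := not_lt.1 hr
      have hlh : m.1 - r ≤ m.1 + r := by omega
      rw [if_neg (show ¬(|targetRow - m.2.1| > |m.1 - m.2.2.1| + |m.2.1 - m.2.2.2|) from by
          rw [hrdef] at hr0; exact not_lt.2 (by linarith)), if_neg hr]
      rw [markAlt_eq_filter ms c (m.1 - r) (m.1 + r) hS]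
      rw [foldl_ins_filter _ _ _ hnd (fun x hx hpx => by
        have hhit : hitIv x ms = true := by simpa using hpx
        rw [hiff x, if_pos hhit])]
      rw [foldAlt_eq_recFold (m.1 - r) (m.1 + r) ms hS hlh]
      exact ih _ _ _ (nodup_foldl_ins _ _ hnd)
        (fun x => by
          rw [get?_foldl_ins, hiff x,
            hitIv_recFold ms (m.1 - r) (m.1 + r) hS.2 hlh x]
          by_cases hx : m.1 - r ≤ x ∧ x ≤ m.1 + r
          · rw [if_pos (PySem.List.mem_pyRange_one.2 ⟨hx.1, by omega⟩),
              if_pos (by rw [decide_eq_true hx]; simp)]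
          · have hnm : x ∉ PySem.List.pyRange (m.1 - r) (m.1 + r + 1) 1 := by
              intro hmem
              exact hx (by have := PySem.List.mem_pyRange_one.1 hmem; omega)
            rw [if_neg hnm]
            have hd : decide (m.1 - r ≤ x ∧ x ≤ m.1 + r) = false := decide_eq_false hx
            rw [hd, Bool.false_or])
        (SG_recFold ms (m.1 - r) (m.1 + r) hS hlh)

-- ===== VERDICT (by name: the statement is the Claim_ definition above) =====
theorem generateCovBeac_spec : Claim_equal_generateCovBeac := by
  intro meas targetRow _
  unfold Spec_generateCovBeac generateCovBeac generateCovBeac_alt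
  have h := loop_eq targetRow meas PySem.Dict.empty PySem.Dict.empty []
    (by simp [PySem.Dict.keys_empty]) (by intro x; simp [PySem.Dict.get?_empty, hitIv])
    (by constructor <;> simp)
  rw [h]
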